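-- pv_equiv track=rewrite | github.com/mayflower/agentsh | src/agentsh/exec/builtins.py | _ifs_split
-- ===== SOURCE A (Python) =====
-- def _ifs_split(line: str, ifs: str) -> list[str]:
--     """Split a line on IFS characters, returning all fields.
--
--     IFS whitespace characters (space, tab, newline) are treated specially:
--     leading/trailing whitespace is trimmed, and runs of whitespace collapse.
--     Non-whitespace IFS characters delimit exactly.
--     """
--     if not ifs:
--         return [line] if line else []
--
--     ifs_white = "".join(c for c in ifs if c in " \t\n")
--     ifs_non_white = "".join(c for c in ifs if c not in " \t\n")
--
--     if not ifs_non_white: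
--         return line.split()
--
--     if not ifs_white:
--         # IFS is only non-whitespace — split on those characters exactly
--         parts = [line]
--         for delim in ifs_non_white:
--             new_parts: list[str] = []
--             for part in parts:
--                 new_parts.extend(part.split(delim))
--             parts = new_parts
--         return parts
--
--     # Mixed: strip IFS whitespace, then split on non-whitespace delimiters
--     stripped = line.strip(ifs_white)
--     if not stripped:
--         return []
--     parts = [stripped]
--     for delim in ifs_non_white:
--         new_parts: list[str] = []
--         for part in parts:
--             new_parts.extend(part.split(delim))
--         parts = new_parts
--     return [p.strip(ifs_white) for p in parts]
-- ===== SOURCE B (Python) =====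
-- def _ifs_split(line: str, ifs: str) -> list[str]:
--     """Single-pass IFS field splitter: one scan over the line with a delimiter
--     set instead of re-splitting every part once per delimiter character."""
--     if not ifs:
--         return [line] if line else []
--
--     delims = {c for c in ifs if c not in " \t\n"}
--     white = "".join(c for c in " \t\n" if c in ifs)
--
--     if not delims:
--         return line.split()
--
--     if white:
--         line = line.strip(white)
--         if not line:
--             return []
--
--     fields: list[str] = []
--     cur: list[str] = []
--     for ch in line:
--         if ch in delims:
--             fields.append("".join(cur))
--             cur = []
--         else:
--             cur.append(ch)
--     fields.append("".join(cur))
--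
--     if white:
--         fields = [f.strip(white) for f in fields]
--     return fields
-- ===== Notes on version B (the rewrite author's own statement) =====
-- stated objective: faster
-- what changed: A re-splits every accumulated part once per delimiter character (building new part lists k times); B builds a delimiter set and a whitespace string once and splits the line in a single left-to-right character scan, stripping only at the ends.
import Mathlib
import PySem

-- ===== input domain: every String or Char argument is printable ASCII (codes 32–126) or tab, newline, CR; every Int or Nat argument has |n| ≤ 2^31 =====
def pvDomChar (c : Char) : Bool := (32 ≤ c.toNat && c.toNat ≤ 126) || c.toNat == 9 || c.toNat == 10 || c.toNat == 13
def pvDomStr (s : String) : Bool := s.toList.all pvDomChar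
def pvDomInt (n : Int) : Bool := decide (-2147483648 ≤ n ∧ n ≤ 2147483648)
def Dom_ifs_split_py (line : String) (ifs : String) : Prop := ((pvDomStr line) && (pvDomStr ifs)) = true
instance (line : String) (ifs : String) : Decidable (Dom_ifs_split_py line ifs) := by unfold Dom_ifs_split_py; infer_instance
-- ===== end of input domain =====

-- B replaces A's nested "re-split every part once per delimiter character" by one
-- left-to-right scan with a delimiter set (objective: faster, one pass).

-- ===== PORT A =====
-- Literal transliteration of A: the two filters build ifs_white / ifs_non_white,
-- then each branch re-splits every part on each delimiter character in turn.
def ifs_split_py (line : String) (ifs : String) : List String :=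
  if ifs = "" then (if line ≠ "" then [line] else [])
  else
    let ifs_white := String.ofList (ifs.toList.filter (fun c => [' ', '\t', '\n'].contains c))
    let ifs_non_white := String.ofList (ifs.toList.filter (fun c => !([' ', '\t', '\n'].contains c)))
    if ifs_non_white = "" then PySem.Str.split₀ line
    else if ifs_white = "" then
      ifs_non_white.toList.foldl
        (fun parts delim => parts.flatMap (fun part => (PySem.Chars.splitOn part.toList [delim]).map String.ofList))
        [line]
    else
      let stripped := PySem.Str.stripChars line ifs_white
      if stripped = "" then []
      else
        (ifs_non_white.toList.foldl
          (fun parts delim => parts.flatMap (fun part => (PySem.Chars.splitOn part.toList [delim]).map String.ofList))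
          [stripped]).map (fun p => PySem.Str.stripChars p ifs_white)

-- ===== PORT B =====
-- Literal transliteration of B (Source B): delimiter SET + one foldl scan over the
-- characters accumulating (emitted fields, current field).
def ifs_split_py_alt (line : String) (ifs : String) : List String :=
  if ifs = "" then (if line ≠ "" then [line] else [])
  else
    let delims : PySem.Set Char := PySem.Set.ofList (ifs.toList.filter (fun c => !([' ', '\t', '\n'].contains c)))
    let white := [' ', '\t', '\n'].filter (fun c => ifs.toList.contains c)
    if delims = [] then PySem.Str.split₀ line
    else
      let src := if white ≠ [] then PySem.Chars.stripChars line.toList white else line.toList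
      if white ≠ [] ∧ src = [] then []
      else
        let st := src.foldl
          (fun (st : List (List Char) × List Char) ch =>
            if PySem.Set.contains delims ch then (st.1 ++ [st.2], []) else (st.1, st.2 ++ [ch]))
          (([], []) : List (List Char) × List Char)
        let fields := st.1 ++ [st.2]
        (if white ≠ [] then fields.map (fun f => PySem.Chars.stripChars f white) else fields).map String.ofList

-- ===== PRECONDITION & SPEC =====
def Spec_ifs_split_py (line : String) (ifs : String) (out : List String) : Prop := out = ifs_split_py_alt line ifs
instance (line : String) (ifs : String) (out : List String) : Decidable (Spec_ifs_split_py line ifs out) := by unfold Spec_ifs_split_py; infer_instance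

-- ===== CLAIM (what is proved, stated in full; the proofs are below) =====
def Claim_equal_ifs_split_py : Prop := ∀ (line : String) (ifs : String), Dom_ifs_split_py line ifs → Spec_ifs_split_py line ifs (ifs_split_py line ifs)

-- ===== LEMMAS AND PROOFS =====

-- split on a boolean predicate, keeping empty fields (Python str.split with a 1-char sep)
def pvSplitP (p : Char → Bool) : List Char → List (List Char)
  | [] => [[]]
  | c :: cs => if p c then [] :: pvSplitP p cs else (pvSplitP p cs).modifyHead (c :: ·)

theorem pvSplitP_ne_nil (p : Char → Bool) (cs : List Char) : pvSplitP p cs ≠ [] := by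
  induction cs with
  | nil => simp [pvSplitP]
  | cons c cs ih =>
    simp only [pvSplitP]
    split
    · simp
    · rcases e : pvSplitP p cs with _ | ⟨f, fs⟩
      · exact absurd e ih
      · simp

theorem pvSplitP_congr (p q : Char → Bool) (h : ∀ c, p c = q c) (cs : List Char) :
    pvSplitP p cs = pvSplitP q cs := by
  induction cs with
  | nil => rfl
  | cons c cs ih => simp only [pvSplitP, h c, ih]

theorem modifyHead_nil_append (l : List (List Char)) :
    l.modifyHead (fun x => [] ++ x) = l := by
  cases l <;> simp

theorem modifyHead_idfun (l : List (List Char)) :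
    l.modifyHead (fun x => x) = l := by
  cases l <;> simp

theorem splitOn_go_spec (d : Char) (cs : List Char) :
    ∀ (n : Nat) (cur : List Char) (acc : List (List Char)), cs.length ≤ n →
    PySem.Chars.splitOn.go [d] (n + 1) cs cur acc
      = acc.reverse ++ (pvSplitP (fun c => d == c) cs).modifyHead (cur.reverse ++ ·) := by
  induction cs with
  | nil =>
    intro n cur acc _
    simp only [PySem.Chars.splitOn.go, pvSplitP]
    simp
  | cons c cs ih =>
    intro n cur acc h
    cases n with
    | zero => simp at h
    | succ m =>
      simp only [PySem.Chars.splitOn.go]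
      have hm : cs.length ≤ m := by simpa using h
      by_cases hdc : d = c
      · have hpre : List.isPrefixOf [d] (c :: cs) = true := by simp [List.isPrefixOf, hdc]
        rw [if_pos hpre]
        have := ih m [] (cur.reverse :: acc) hm
        simp only [List.length_cons, List.length_nil] at this ⊢
        rw [show List.drop 1 (c :: cs) = cs from rfl, this]
        simp [pvSplitP, hdc, modifyHead_idfun]
      · have hpre : List.isPrefixOf [d] (c :: cs) = false := by simp [List.isPrefixOf, hdc]
        rw [if_neg (by simp [hpre])]
        have := ih m (c :: cur) acc hm
        rw [this]
        have hne := pvSplitP_ne_nil (fun c => d == c) cs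
        rcases e : pvSplitP (fun c => d == c) cs with _ | ⟨f, fs⟩
        · exact absurd e hne
        · simp [pvSplitP, hdc, e]

theorem splitOn_single (d : Char) (cs : List Char) :
    PySem.Chars.splitOn cs [d] = pvSplitP (fun c => d == c) cs := by
  show PySem.Chars.splitOn.go [d] (cs.length + 1) cs [] [] = _
  rw [splitOn_go_spec d cs cs.length [] [] le_rfl]
  simp [modifyHead_idfun]

theorem flatMap_pvSplitP (p q : Char → Bool) (cs : List Char) :
    (pvSplitP p cs).flatMap (pvSplitP q) = pvSplitP (fun c => p c || q c) cs := by
  induction cs with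
  | nil => simp [pvSplitP]
  | cons c cs ih =>
    by_cases hp : p c
    · simp only [pvSplitP, hp, if_pos, Bool.true_or]
      simp [pvSplitP, ih]
    · rcases e : pvSplitP p cs with _ | ⟨f, fs⟩
      · exact absurd e (pvSplitP_ne_nil p cs)
      · rw [e] at ih
        have hLHS : pvSplitP p (c :: cs) = (c :: f) :: fs := by simp [pvSplitP, hp, e]
        rw [hLHS]
        by_cases hq : q c
        · have h1 : pvSplitP q (c :: f) = [] :: pvSplitP q f := by simp [pvSplitP, hq]
          have h2 : pvSplitP (fun x => p x || q x) (c :: cs)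
              = [] :: pvSplitP (fun x => p x || q x) cs := by simp [pvSplitP, hp, hq]
          rw [List.flatMap_cons, h1, h2, ← ih]
          simp
        · rcases e2 : pvSplitP q f with _ | ⟨g, gs⟩
          · exact absurd e2 (pvSplitP_ne_nil q f)
          · have h1 : pvSplitP q (c :: f) = (c :: g) :: gs := by simp [pvSplitP, hq, e2]
            have h2 : pvSplitP (fun x => p x || q x) (c :: cs)
                = List.modifyHead (fun x => c :: x) (pvSplitP (fun x => p x || q x) cs) := by
              simp [pvSplitP, hp, hq]
            rw [List.flatMap_cons, h1, h2, ← ih, List.flatMap_cons, e2]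
            simp

theorem foldl_pvSplitP (ds : List Char) (p : Char → Bool) (cs : List Char) :
    ds.foldl (fun ps d => ps.flatMap (pvSplitP (fun c => d == c))) (pvSplitP p cs)
      = pvSplitP (fun c => p c || decide (c ∈ ds)) cs := by
  induction ds generalizing p with
  | nil => simp only [List.foldl_nil]; exact pvSplitP_congr _ _ (by simp) cs
  | cons d ds ih =>
    simp only [List.foldl_cons, flatMap_pvSplitP]
    rw [ih]
    refine pvSplitP_congr _ _ (fun c => ?_) cs
    by_cases hc : c = d
    · simp [hc]
    · have hdc : (d == c) = false := beq_eq_false_iff_ne.mpr (fun h => hc h.symm)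
      simp [hdc, hc]

theorem foldl_pvSplitP_start (ds : List Char) (hds : ds ≠ []) (cs : List Char) :
    ds.foldl (fun ps e => ps.flatMap (pvSplitP (fun c => e == c))) [cs]
      = pvSplitP (fun c => decide (c ∈ ds)) cs := by
  cases ds with
  | nil => exact absurd rfl hds
  | cons d rest =>
    simp only [List.foldl_cons, List.flatMap_cons, List.flatMap_nil, List.append_nil]
    rw [foldl_pvSplitP rest (fun c => d == c) cs]
    refine pvSplitP_congr _ _ (fun c => ?_) cs
    by_cases hc : c = d
    · simp [hc]
    · have hdc : (d == c) = false := beq_eq_false_iff_ne.mpr (fun h => hc h.symm)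
      simp [hdc, hc]

theorem foldA (ds : List Char) (parts : List (List Char)) :
    ds.foldl
      (fun ps delim => ps.flatMap (fun part => (PySem.Chars.splitOn part.toList [delim]).map String.ofList))
      (parts.map String.ofList)
    = (ds.foldl (fun ps d => ps.flatMap (pvSplitP (fun c => d == c))) parts).map String.ofList := by
  induction ds generalizing parts with
  | nil => simp
  | cons d ds ih =>
    simp only [List.foldl_cons]
    have step : (parts.map String.ofList).flatMap
          (fun part => (PySem.Chars.splitOn part.toList [d]).map String.ofList)
        = (parts.flatMap (pvSplitP (fun c => d == c))).map String.ofList := by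
      rw [List.flatMap_map, List.map_flatMap]
      refine List.flatMap_congr (fun part _ => ?_)
      simp [splitOn_single]
    rw [step, ih]

theorem scan_spec (p : Char → Bool) (cs : List Char) :
    ∀ (fields : List (List Char)) (cur : List Char),
    (cs.foldl (fun st ch => if p ch then (st.1 ++ [st.2], []) else (st.1, st.2 ++ [ch]))
        ((fields, cur) : List (List Char) × List Char)).1
      ++ [(cs.foldl (fun st ch => if p ch then (st.1 ++ [st.2], []) else (st.1, st.2 ++ [ch]))
        ((fields, cur) : List (List Char) × List Char)).2]
    = fields ++ (pvSplitP p cs).modifyHead (cur ++ ·) := by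
  induction cs with
  | nil => intro fields cur; simp [pvSplitP]
  | cons c cs ih =>
    intro fields cur
    by_cases hp : p c
    · simp only [List.foldl_cons, hp, if_pos]
      rw [ih (fields ++ [cur]) []]
      simp [pvSplitP, hp, modifyHead_idfun]
    · simp only [List.foldl_cons, hp, Bool.false_eq_true, if_false]
      rw [ih fields (cur ++ [c])]
      rcases e : pvSplitP p cs with _ | ⟨f, fs⟩
      · exact absurd e (pvSplitP_ne_nil p cs)
      · simp [pvSplitP, hp, e]

theorem stripChars_congr (cs ws ws' : List Char) (h : ∀ c, ws.contains c = ws'.contains c) :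
    PySem.Chars.stripChars cs ws = PySem.Chars.stripChars cs ws' := by
  have hf : ws.contains = ws'.contains := funext h
  simp only [PySem.Chars.stripChars, hf]

-- ===== VERDICT (by name: the statement is the Claim_ definition above) =====
set_option maxHeartbeats 1000000 in
theorem ifs_split_py_spec : Claim_equal_ifs_split_py := by
  unfold Claim_equal_ifs_split_py
  intro line ifs _
  unfold Spec_ifs_split_py ifs_split_py ifs_split_py_alt
  by_cases h0 : ifs = ""
  · simp [h0]
  · rw [if_neg h0, if_neg h0]
    dsimp only
    set L := line.toList with hL
    set I := ifs.toList with hI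
    set nw := I.filter (fun c => !([' ', '\t', '\n'].contains c)) with hnwdef
    set whA := I.filter (fun c => [' ', '\t', '\n'].contains c) with hwhAdef
    set whB := ([' ', '\t', '\n'] : List Char).filter (fun c => I.contains c) with hwhBdef
    have F1 : ∀ (l : List Char), (String.ofList l).toList = l := fun l => by simp
    have F2 : ∀ (s : String), String.ofList s.toList = s := fun s => by simp
    have Fnil : String.ofList ([] : List Char) = "" := by simp
    have F3 : ∀ (l : List Char), (String.ofList l = "") ↔ l = [] := by
      intro l
      constructor
      · intro h
        have := congrArg String.toList h
        rw [F1] at this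
        simpa using this
      · rintro rfl; exact Fnil
    have Fc : ∀ (l : List Char) (c : Char), l.contains c = decide (c ∈ l) := by
      intro l c
      by_cases h : c ∈ l <;> simp [h]
    have F4 : ∀ c, whA.contains c = whB.contains c := by
      intro c
      rw [Fc, Fc, decide_eq_decide]
      simp only [hwhAdef, hwhBdef, List.mem_filter, Fc, decide_eq_true_eq]
      exact and_comm
    have F5 : whA = [] ↔ whB = [] := by
      rw [hwhAdef, hwhBdef]
      simp only [List.filter_eq_nil_iff, Fc, decide_eq_true_eq]
      exact ⟨fun h c hw hi => h c hi hw, fun h c hi hw => h c hw hi⟩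
    have F6 : (PySem.Set.ofList nw = ([] : List Char)) ↔ nw = [] := by
      cases h : nw with
      | nil => simp
      | cons d rest => simp [PySem.Set.ofList_cons]
    have F7 : ∀ c, PySem.Set.contains (PySem.Set.ofList nw) c = nw.contains c := by
      intro c
      rw [Fc]
      by_cases h : c ∈ nw <;> simp [h, PySem.Set.mem_ofList]
    by_cases hnwE : nw = []
    · rw [if_pos ((F3 nw).mpr hnwE), if_pos (F6.mpr hnwE)]
    · rw [if_neg (fun h => hnwE ((F3 nw).mp h)), if_neg (fun h => hnwE (F6.mp h))]
      by_cases hwhE : whB = []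
      · -- pure non-whitespace delimiters
        have hA2 : String.ofList whA = "" := by rw [F5.mpr hwhE]
        rw [if_pos hA2, if_neg (fun h : whB ≠ [] => h hwhE)]
        rw [if_neg (fun h : whB ≠ [] ∧ L = [] => h.1 hwhE)]
        rw [if_neg (fun h : whB ≠ [] => h hwhE)]
        rw [F1 nw]
        have hline : ([line] : List String) = ([L] : List (List Char)).map String.ofList := by
          rw [hL]; simp [F2]
        rw [hline]
        rw [foldA, foldl_pvSplitP_start nw hnwE]
        rw [scan_spec (fun ch => PySem.Set.contains (PySem.Set.ofList nw) ch) L [] []]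
        rw [List.nil_append, modifyHead_nil_append]
        rw [pvSplitP_congr (fun c => decide (c ∈ nw))
          (fun ch => PySem.Set.contains (PySem.Set.ofList nw) ch)
          (fun c => ((F7 c).trans (Fc nw c)).symm) L]
      · -- mixed whitespace + delimiters
        have hwhA_ne : whA ≠ [] := fun h => hwhE (F5.mp h)
        have hA2 : ¬(String.ofList whA = "") := fun h => hwhA_ne ((F3 whA).mp h)
        rw [if_neg hA2, if_pos (hwhE : whB ≠ [])]
        set S := PySem.Chars.stripChars L whB with hSdef
        have hstr : PySem.Str.stripChars line (String.ofList whA) = String.ofList S := by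
          show String.ofList (PySem.Chars.stripChars line.toList (String.ofList whA).toList)
              = String.ofList S
          rw [F1, ← hL, hSdef]
          exact congrArg _ (stripChars_congr L whA whB F4)
        rw [hstr]
        by_cases hS : S = []
        · rw [if_pos ((F3 S).mpr hS), if_pos ⟨(hwhE : whB ≠ []), hS⟩]
        · rw [if_neg (fun h => hS ((F3 S).mp h)), if_neg (fun h : whB ≠ [] ∧ S = [] => hS h.2)]
          rw [F1 nw]
          rw [show ([String.ofList S] : List String) = ([S] : List (List Char)).map String.ofList
            from rfl]
          rw [foldA, foldl_pvSplitP_start nw hnwE]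
          rw [scan_spec (fun ch => PySem.Set.contains (PySem.Set.ofList nw) ch) S [] []]
          rw [List.nil_append, modifyHead_nil_append]
          rw [if_pos (hwhE : whB ≠ [])]
          rw [pvSplitP_congr (fun c => decide (c ∈ nw))
            (fun ch => PySem.Set.contains (PySem.Set.ofList nw) ch)
            (fun c => ((F7 c).trans (Fc nw c)).symm) S]
          rw [List.map_map, List.map_map]
          refine List.map_congr_left (fun cs _ => ?_)
          show PySem.Str.stripChars (String.ofList cs) (String.ofList whA)
              = String.ofList (PySem.Chars.stripChars cs whB)
          show String.ofList (PySem.Chars.stripChars (String.ofList cs).toList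
              (String.ofList whA).toList) = _
          rw [F1, F1]
          exact congrArg _ (stripChars_congr cs whA whB F4)
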